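-- pv_equiv track=rewrite | github.com/AnalyzingBasketball/EUROLEAGUE_SIMILARITIES | similarity.py | _build_team_maps
-- ===== SOURCE A (Python) =====
-- _BASE_ABBREV = {
--     "ALBA BERLIN": "BER", "ANADOLU EFES": "EFS", "AS MONACO": "ASM",
--     "AS MONACO BASKET": "ASM", "ASVEL BASKET": "ASV", "ASVEL VILLEURBANNE": "ASV",
--     "LDLC ASVEL": "ASV", "AX ARMANI EXCHANGE MILANO": "MIL",
--     "OLIMPIA MILANO": "MIL", "EA7 EMPORIO ARMANI MILAN": "MIL",
--     "EA7 EMPORIO ARMANI MILANO": "MIL", "BASKONIA": "BAS",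
--     "BASKONIA VITORIA-GASTEIZ": "BAS", "BAYERN MUNICH": "BAY",
--     "FC BAYERN MUNICH": "BAY", "FC BARCELONA": "FCB",
--     "FENERBAHCE BEKO": "FEN", "FENERBAHCE BEKO ISTANBUL": "FEN",
--     "FENERBAHCE SK": "FEN", "KK CRVENA ZVEZDA": "CZV",
--     "KK PARTIZAN": "PAR", "PARTIZAN MOZZART BET BELGRADE": "PAR",
--     "MACCABI FOX TEL AVIV": "MAC", "MACCABI TEL AVIV BC": "MAC",
--     "MACCABI TEL AVIV": "MAC", "MACCABI RAPYD TEL AVIV": "MAC",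
--     "OLYMPIACOS": "OLY", "OLYMPIACOS PIRAEUS": "OLY",
--     "PANATHINAIKOS": "PAO", "PANATHINAIKOS AKTOR ATHENS": "PAO",
--     "PARIS BASKETBALL": "PRS", "REAL MADRID": "RMB",
--     "VIRTUS BOLOGNA": "VBO", "ZALGIRIS KAUNAS": "ZAL",
--     "BC ZALGIRIS": "ZAL", "HAPOEL TEL AVIV": "HAP",
--     "DUBAI BASKETBALL": "DUB", "VALENCIA BASKET": "VAL",
-- }
--
-- _BASE_COLORS = {
--     "ALBA BERLIN": "#FFE135", "ANADOLU EFES": "#0074C8", "AS MONACO": "#CE1126",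
--     "AS MONACO BASKET": "#CE1126", "ASVEL BASKET": "#000000", "ASVEL VILLEURBANNE": "#000000",
--     "LDLC ASVEL": "#000000", "AX ARMANI EXCHANGE MILANO": "#C8102E",
--     "OLIMPIA MILANO": "#C8102E", "EA7 EMPORIO ARMANI MILAN": "#C8102E",
--     "EA7 EMPORIO ARMANI MILANO": "#C8102E", "BASKONIA": "#841617",
--     "BASKONIA VITORIA-GASTEIZ": "#841617", "BAYERN MUNICH": "#DC052D",
--     "FC BAYERN MUNICH": "#DC052D", "FC BARCELONA": "#004D98",
--     "FENERBAHCE BEKO": "#FFED00", "FENERBAHCE BEKO ISTANBUL": "#FFED00",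
--     "FENERBAHCE SK": "#FFED00", "KK CRVENA ZVEZDA": "#CC0000",
--     "KK PARTIZAN": "#000000", "PARTIZAN MOZZART BET BELGRADE": "#000000",
--     "MACCABI FOX TEL AVIV": "#FFD700", "MACCABI TEL AVIV BC": "#FFD700",
--     "MACCABI TEL AVIV": "#FFD700", "MACCABI RAPYD TEL AVIV": "#FFD700",
--     "OLYMPIACOS": "#DC143C", "OLYMPIACOS PIRAEUS": "#DC143C",
--     "PANATHINAIKOS": "#006400", "PANATHINAIKOS AKTOR ATHENS": "#006400",
--     "PARIS BASKETBALL": "#1A1AFF", "REAL MADRID": "#FABE00",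
--     "VIRTUS BOLOGNA": "#1C1C1C", "ZALGIRIS KAUNAS": "#007A33",
--     "BC ZALGIRIS": "#007A33", "HAPOEL TEL AVIV": "#CC0000",
--     "DUBAI BASKETBALL": "#003DA5", "VALENCIA BASKET": "#F47920",
-- }
--
-- _BASE_COLORS2 = {
--     "ALBA BERLIN": "#000000", "ANADOLU EFES": "#FFFFFF", "AS MONACO": "#FFFFFF",
--     "AS MONACO BASKET": "#FFFFFF", "ASVEL BASKET": "#C8A000", "ASVEL VILLEURBANNE": "#C8A000",
--     "LDLC ASVEL": "#C8A000", "AX ARMANI EXCHANGE MILANO": "#000000",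
--     "OLIMPIA MILANO": "#000000", "EA7 EMPORIO ARMANI MILAN": "#000000",
--     "EA7 EMPORIO ARMANI MILANO": "#000000", "BASKONIA": "#FFFFFF",
--     "BASKONIA VITORIA-GASTEIZ": "#FFFFFF", "BAYERN MUNICH": "#0066B2",
--     "FC BAYERN MUNICH": "#0066B2", "FC BARCELONA": "#A50044",
--     "FENERBAHCE BEKO": "#002D62", "FENERBAHCE BEKO ISTANBUL": "#002D62",
--     "FENERBAHCE SK": "#002D62", "KK CRVENA ZVEZDA": "#003087",
--     "KK PARTIZAN": "#CFB53B", "PARTIZAN MOZZART BET BELGRADE": "#CFB53B",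
--     "MACCABI FOX TEL AVIV": "#003DA5", "MACCABI TEL AVIV BC": "#003DA5",
--     "MACCABI TEL AVIV": "#003DA5", "MACCABI RAPYD TEL AVIV": "#003DA5",
--     "OLYMPIACOS": "#FFFFFF", "OLYMPIACOS PIRAEUS": "#FFFFFF",
--     "PANATHINAIKOS": "#000000", "PANATHINAIKOS AKTOR ATHENS": "#000000",
--     "PARIS BASKETBALL": "#F4A300", "REAL MADRID": "#00529F",
--     "VIRTUS BOLOGNA": "#C8A000", "ZALGIRIS KAUNAS": "#FFFFFF",
--     "BC ZALGIRIS": "#FFFFFF", "HAPOEL TEL AVIV": "#000000",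
--     "DUBAI BASKETBALL": "#FFD700", "VALENCIA BASKET": "#000000",
-- }
--
-- def _norm_team(s):
--     return " ".join(str(s).upper().split())
--
-- def _auto_abbrev(name):
--     t = _norm_team(name)
--     parts = [p for p in t.replace("-", " ").split() if p.isalpha()]
--     if not parts: return (t[:3] + "XXX")[:3]
--     skip = {"FC", "KK", "BC", "AS", "LDLC", "EA7", "AX"}
--     core = [p for p in parts if p not in skip]
--     return ((core[0] if core else parts[-1])[:3]).upper()
--
-- def _build_team_maps(teams):
--     abbrev, color, color2 = {}, {}, {}
--     for t in teams:
--         tn = _norm_team(t)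
--         ab, co, co2 = None, None, None
--         for alias, v in _BASE_ABBREV.items():
--             an = _norm_team(alias)
--             if an in tn or tn in an: ab = v; break
--         for alias, v in _BASE_COLORS.items():
--             an = _norm_team(alias)
--             if an in tn or tn in an: co = v; break
--         for alias, v in _BASE_COLORS2.items():
--             an = _norm_team(alias)
--             if an in tn or tn in an: co2 = v; break
--         abbrev[t] = ab or _auto_abbrev(t)
--         color[t]  = co or "#777777"
--         color2[t] = co2 or "#AAAAAA"
--     return abbrev, color, color2
-- ===== SOURCE B (Python) =====
-- # Compact packed alias table (one "alias|abbrev|color|color2" row per alias, aliases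
-- # already normalized), resolved once per distinct team; results assembled per field.
-- _ROWS = [
--     "ALBA BERLIN|BER|#FFE135|#000000",
--     "ANADOLU EFES|EFS|#0074C8|#FFFFFF",
--     "AS MONACO|ASM|#CE1126|#FFFFFF",
--     "AS MONACO BASKET|ASM|#CE1126|#FFFFFF",
--     "ASVEL BASKET|ASV|#000000|#C8A000",
--     "ASVEL VILLEURBANNE|ASV|#000000|#C8A000",
--     "LDLC ASVEL|ASV|#000000|#C8A000",
--     "AX ARMANI EXCHANGE MILANO|MIL|#C8102E|#000000",
--     "OLIMPIA MILANO|MIL|#C8102E|#000000",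
--     "EA7 EMPORIO ARMANI MILAN|MIL|#C8102E|#000000",
--     "EA7 EMPORIO ARMANI MILANO|MIL|#C8102E|#000000",
--     "BASKONIA|BAS|#841617|#FFFFFF",
--     "BASKONIA VITORIA-GASTEIZ|BAS|#841617|#FFFFFF",
--     "BAYERN MUNICH|BAY|#DC052D|#0066B2",
--     "FC BAYERN MUNICH|BAY|#DC052D|#0066B2",
--     "FC BARCELONA|FCB|#004D98|#A50044",
--     "FENERBAHCE BEKO|FEN|#FFED00|#002D62",
--     "FENERBAHCE BEKO ISTANBUL|FEN|#FFED00|#002D62",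
--     "FENERBAHCE SK|FEN|#FFED00|#002D62",
--     "KK CRVENA ZVEZDA|CZV|#CC0000|#003087",
--     "KK PARTIZAN|PAR|#000000|#CFB53B",
--     "PARTIZAN MOZZART BET BELGRADE|PAR|#000000|#CFB53B",
--     "MACCABI FOX TEL AVIV|MAC|#FFD700|#003DA5",
--     "MACCABI TEL AVIV BC|MAC|#FFD700|#003DA5",
--     "MACCABI TEL AVIV|MAC|#FFD700|#003DA5",
--     "MACCABI RAPYD TEL AVIV|MAC|#FFD700|#003DA5",
--     "OLYMPIACOS|OLY|#DC143C|#FFFFFF",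
--     "OLYMPIACOS PIRAEUS|OLY|#DC143C|#FFFFFF",
--     "PANATHINAIKOS|PAO|#006400|#000000",
--     "PANATHINAIKOS AKTOR ATHENS|PAO|#006400|#000000",
--     "PARIS BASKETBALL|PRS|#1A1AFF|#F4A300",
--     "REAL MADRID|RMB|#FABE00|#00529F",
--     "VIRTUS BOLOGNA|VBO|#1C1C1C|#C8A000",
--     "ZALGIRIS KAUNAS|ZAL|#007A33|#FFFFFF",
--     "BC ZALGIRIS|ZAL|#007A33|#FFFFFF",
--     "HAPOEL TEL AVIV|HAP|#CC0000|#000000",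
--     "DUBAI BASKETBALL|DUB|#003DA5|#FFD700",
--     "VALENCIA BASKET|VAL|#F47920|#000000",
-- ]
--
-- def _norm_team(s):
--     return " ".join(str(s).upper().split())
--
-- def _auto_abbrev(name):
--     t = _norm_team(name)
--     parts = [p for p in t.replace("-", " ").split() if p.isalpha()]
--     if not parts: return (t[:3] + "XXX")[:3]
--     skip = {"FC", "KK", "BC", "AS", "LDLC", "EA7", "AX"}
--     core = [p for p in parts if p not in skip]
--     return ((core[0] if core else parts[-1])[:3]).upper()
--
-- def _resolve(t):
--     tn = _norm_team(t)
--     for row in _ROWS: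
--         an, ab, co, co2 = row.split("|")
--         if an in tn or tn in an:
--             return ab, co, co2
--     return _auto_abbrev(t), "#777777", "#AAAAAA"
--
-- def _build_team_maps(teams):
--     rows = [(t, _resolve(t)) for t in dict.fromkeys(teams)]
--     return (dict((t, v[0]) for t, v in rows),
--             dict((t, v[1]) for t, v in rows),
--             dict((t, v[2]) for t, v in rows))
-- ===== Notes on version B (the rewrite author's own statement) =====
-- stated objective: faster
-- what changed: B packs the three parallel alias dicts into one 'alias|abbrev|color|color2' row table, dedups the team list first (dict.fromkeys), resolves each DISTINCT team once with a single scan of the packed rows, and assembles the three result dicts per field afterwards, instead of A's three separate alias-dict scans (each re-normalizing every alias) run for every team occurrence.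
import Mathlib
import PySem

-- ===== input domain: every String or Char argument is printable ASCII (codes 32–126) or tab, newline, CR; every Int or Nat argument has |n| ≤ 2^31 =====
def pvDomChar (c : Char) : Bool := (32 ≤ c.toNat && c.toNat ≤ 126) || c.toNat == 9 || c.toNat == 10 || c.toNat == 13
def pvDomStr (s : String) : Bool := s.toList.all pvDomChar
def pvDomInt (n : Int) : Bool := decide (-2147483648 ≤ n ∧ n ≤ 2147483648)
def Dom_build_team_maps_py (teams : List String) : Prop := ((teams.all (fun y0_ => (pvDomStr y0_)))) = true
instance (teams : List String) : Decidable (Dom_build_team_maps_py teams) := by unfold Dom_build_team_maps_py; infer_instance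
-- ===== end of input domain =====

-- B replaces A's three per-team scans over three parallel dicts with one packed
-- "alias|abbrev|color|color2" table resolved once per DISTINCT team (dict.fromkeys
-- dedup), the three result dicts assembled per field afterwards (objective: faster, measured).

-- ===== PORT A =====
-- shared module helpers (_norm_team, _auto_abbrev) used verbatim by both Pythons
def pvNorm (s : String) : String :=
  PySem.Str.join " " (PySem.Str.split₀ (PySem.Str.upper s))

def pvAuto (name : String) : String :=
  let t := pvNorm name
  let parts := (PySem.Str.split₀ (PySem.Str.replace t "-" " ")).filter (fun p => PySem.Str.strIsalpha p)
  match parts with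
  | [] => PySem.Str.slice (PySem.Str.join "" [PySem.Str.slice t none (some 3), "XXX"]) none (some 3)
  | p0 :: ps =>
    let skip : PySem.Set String := PySem.Set.ofList ["FC", "KK", "BC", "AS", "LDLC", "EA7", "AX"]
    let core := (p0 :: ps).filter (fun p => !(PySem.Set.contains skip p))
    PySem.Str.upper (PySem.Str.slice (match core with | c :: _ => c | [] => (p0 :: ps).getLastD p0) none (some 3))

def pvBaseAbbrev : List (String × String) := [
  ("ALBA BERLIN", "BER"), ("ANADOLU EFES", "EFS"), ("AS MONACO", "ASM"),
  ("AS MONACO BASKET", "ASM"), ("ASVEL BASKET", "ASV"), ("ASVEL VILLEURBANNE", "ASV"),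
  ("LDLC ASVEL", "ASV"), ("AX ARMANI EXCHANGE MILANO", "MIL"),
  ("OLIMPIA MILANO", "MIL"), ("EA7 EMPORIO ARMANI MILAN", "MIL"),
  ("EA7 EMPORIO ARMANI MILANO", "MIL"), ("BASKONIA", "BAS"),
  ("BASKONIA VITORIA-GASTEIZ", "BAS"), ("BAYERN MUNICH", "BAY"),
  ("FC BAYERN MUNICH", "BAY"), ("FC BARCELONA", "FCB"),
  ("FENERBAHCE BEKO", "FEN"), ("FENERBAHCE BEKO ISTANBUL", "FEN"),
  ("FENERBAHCE SK", "FEN"), ("KK CRVENA ZVEZDA", "CZV"),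
  ("KK PARTIZAN", "PAR"), ("PARTIZAN MOZZART BET BELGRADE", "PAR"),
  ("MACCABI FOX TEL AVIV", "MAC"), ("MACCABI TEL AVIV BC", "MAC"),
  ("MACCABI TEL AVIV", "MAC"), ("MACCABI RAPYD TEL AVIV", "MAC"),
  ("OLYMPIACOS", "OLY"), ("OLYMPIACOS PIRAEUS", "OLY"),
  ("PANATHINAIKOS", "PAO"), ("PANATHINAIKOS AKTOR ATHENS", "PAO"),
  ("PARIS BASKETBALL", "PRS"), ("REAL MADRID", "RMB"),
  ("VIRTUS BOLOGNA", "VBO"), ("ZALGIRIS KAUNAS", "ZAL"),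
  ("BC ZALGIRIS", "ZAL"), ("HAPOEL TEL AVIV", "HAP"),
  ("DUBAI BASKETBALL", "DUB"), ("VALENCIA BASKET", "VAL")]

def pvBaseColors : List (String × String) := [
  ("ALBA BERLIN", "#FFE135"), ("ANADOLU EFES", "#0074C8"), ("AS MONACO", "#CE1126"),
  ("AS MONACO BASKET", "#CE1126"), ("ASVEL BASKET", "#000000"), ("ASVEL VILLEURBANNE", "#000000"),
  ("LDLC ASVEL", "#000000"), ("AX ARMANI EXCHANGE MILANO", "#C8102E"),
  ("OLIMPIA MILANO", "#C8102E"), ("EA7 EMPORIO ARMANI MILAN", "#C8102E"),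
  ("EA7 EMPORIO ARMANI MILANO", "#C8102E"), ("BASKONIA", "#841617"),
  ("BASKONIA VITORIA-GASTEIZ", "#841617"), ("BAYERN MUNICH", "#DC052D"),
  ("FC BAYERN MUNICH", "#DC052D"), ("FC BARCELONA", "#004D98"),
  ("FENERBAHCE BEKO", "#FFED00"), ("FENERBAHCE BEKO ISTANBUL", "#FFED00"),
  ("FENERBAHCE SK", "#FFED00"), ("KK CRVENA ZVEZDA", "#CC0000"),
  ("KK PARTIZAN", "#000000"), ("PARTIZAN MOZZART BET BELGRADE", "#000000"),
  ("MACCABI FOX TEL AVIV", "#FFD700"), ("MACCABI TEL AVIV BC", "#FFD700"),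
  ("MACCABI TEL AVIV", "#FFD700"), ("MACCABI RAPYD TEL AVIV", "#FFD700"),
  ("OLYMPIACOS", "#DC143C"), ("OLYMPIACOS PIRAEUS", "#DC143C"),
  ("PANATHINAIKOS", "#006400"), ("PANATHINAIKOS AKTOR ATHENS", "#006400"),
  ("PARIS BASKETBALL", "#1A1AFF"), ("REAL MADRID", "#FABE00"),
  ("VIRTUS BOLOGNA", "#1C1C1C"), ("ZALGIRIS KAUNAS", "#007A33"),
  ("BC ZALGIRIS", "#007A33"), ("HAPOEL TEL AVIV", "#CC0000"),
  ("DUBAI BASKETBALL", "#003DA5"), ("VALENCIA BASKET", "#F47920")]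

def pvBaseColors2 : List (String × String) := [
  ("ALBA BERLIN", "#000000"), ("ANADOLU EFES", "#FFFFFF"), ("AS MONACO", "#FFFFFF"),
  ("AS MONACO BASKET", "#FFFFFF"), ("ASVEL BASKET", "#C8A000"), ("ASVEL VILLEURBANNE", "#C8A000"),
  ("LDLC ASVEL", "#C8A000"), ("AX ARMANI EXCHANGE MILANO", "#000000"),
  ("OLIMPIA MILANO", "#000000"), ("EA7 EMPORIO ARMANI MILAN", "#000000"),
  ("EA7 EMPORIO ARMANI MILANO", "#000000"), ("BASKONIA", "#FFFFFF"),
  ("BASKONIA VITORIA-GASTEIZ", "#FFFFFF"), ("BAYERN MUNICH", "#0066B2"),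
  ("FC BAYERN MUNICH", "#0066B2"), ("FC BARCELONA", "#A50044"),
  ("FENERBAHCE BEKO", "#002D62"), ("FENERBAHCE BEKO ISTANBUL", "#002D62"),
  ("FENERBAHCE SK", "#002D62"), ("KK CRVENA ZVEZDA", "#003087"),
  ("KK PARTIZAN", "#CFB53B"), ("PARTIZAN MOZZART BET BELGRADE", "#CFB53B"),
  ("MACCABI FOX TEL AVIV", "#003DA5"), ("MACCABI TEL AVIV BC", "#003DA5"),
  ("MACCABI TEL AVIV", "#003DA5"), ("MACCABI RAPYD TEL AVIV", "#003DA5"),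
  ("OLYMPIACOS", "#FFFFFF"), ("OLYMPIACOS PIRAEUS", "#FFFFFF"),
  ("PANATHINAIKOS", "#000000"), ("PANATHINAIKOS AKTOR ATHENS", "#000000"),
  ("PARIS BASKETBALL", "#F4A300"), ("REAL MADRID", "#00529F"),
  ("VIRTUS BOLOGNA", "#C8A000"), ("ZALGIRIS KAUNAS", "#FFFFFF"),
  ("BC ZALGIRIS", "#FFFFFF"), ("HAPOEL TEL AVIV", "#000000"),
  ("DUBAI BASKETBALL", "#FFD700"), ("VALENCIA BASKET", "#000000")]

-- A's inner 'for alias, v in d.items(): an = _norm_team(alias); if an in tn or tn in an: … break'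
def pvScan (tn : String) : List (String × String) → Option String
  | [] => none
  | (al, v) :: rest =>
    if (PySem.Str.isIn (pvNorm al) tn || PySem.Str.isIn tn (pvNorm al)) = true then some v
    else pvScan tn rest

-- Python 'x or d' on an optional string (None and "" are falsy)
def pvOr (o : Option String) (d : String) : String :=
  match o with
  | none => d
  | some v => if v = "" then d else v

def build_team_maps_py (teams : List String) : (List (String × String)) × (List (String × String)) × (List (String × String)) :=
  let st := teams.foldl
    (fun (st : PySem.Dict String String × PySem.Dict String String × PySem.Dict String String) t =>
      let tn := pvNorm t
      let ab := pvScan tn pvBaseAbbrev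
      let co := pvScan tn pvBaseColors
      let co2 := pvScan tn pvBaseColors2
      (st.1.insert t (pvOr ab (pvAuto t)),
       st.2.1.insert t (pvOr co "#777777"),
       st.2.2.insert t (pvOr co2 "#AAAAAA")))
    (PySem.Dict.empty, PySem.Dict.empty, PySem.Dict.empty)
  (st.1.items, st.2.1.items, st.2.2.items)

-- ===== PORT B =====
-- B's packed table: one "alias|abbrev|color|color2" row per alias
def pvRows : List String := [
  "ALBA BERLIN|BER|#FFE135|#000000",
  "ANADOLU EFES|EFS|#0074C8|#FFFFFF",
  "AS MONACO|ASM|#CE1126|#FFFFFF",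
  "AS MONACO BASKET|ASM|#CE1126|#FFFFFF",
  "ASVEL BASKET|ASV|#000000|#C8A000",
  "ASVEL VILLEURBANNE|ASV|#000000|#C8A000",
  "LDLC ASVEL|ASV|#000000|#C8A000",
  "AX ARMANI EXCHANGE MILANO|MIL|#C8102E|#000000",
  "OLIMPIA MILANO|MIL|#C8102E|#000000",
  "EA7 EMPORIO ARMANI MILAN|MIL|#C8102E|#000000",
  "EA7 EMPORIO ARMANI MILANO|MIL|#C8102E|#000000",
  "BASKONIA|BAS|#841617|#FFFFFF",
  "BASKONIA VITORIA-GASTEIZ|BAS|#841617|#FFFFFF",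
  "BAYERN MUNICH|BAY|#DC052D|#0066B2",
  "FC BAYERN MUNICH|BAY|#DC052D|#0066B2",
  "FC BARCELONA|FCB|#004D98|#A50044",
  "FENERBAHCE BEKO|FEN|#FFED00|#002D62",
  "FENERBAHCE BEKO ISTANBUL|FEN|#FFED00|#002D62",
  "FENERBAHCE SK|FEN|#FFED00|#002D62",
  "KK CRVENA ZVEZDA|CZV|#CC0000|#003087",
  "KK PARTIZAN|PAR|#000000|#CFB53B",
  "PARTIZAN MOZZART BET BELGRADE|PAR|#000000|#CFB53B",
  "MACCABI FOX TEL AVIV|MAC|#FFD700|#003DA5",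
  "MACCABI TEL AVIV BC|MAC|#FFD700|#003DA5",
  "MACCABI TEL AVIV|MAC|#FFD700|#003DA5",
  "MACCABI RAPYD TEL AVIV|MAC|#FFD700|#003DA5",
  "OLYMPIACOS|OLY|#DC143C|#FFFFFF",
  "OLYMPIACOS PIRAEUS|OLY|#DC143C|#FFFFFF",
  "PANATHINAIKOS|PAO|#006400|#000000",
  "PANATHINAIKOS AKTOR ATHENS|PAO|#006400|#000000",
  "PARIS BASKETBALL|PRS|#1A1AFF|#F4A300",
  "REAL MADRID|RMB|#FABE00|#00529F",
  "VIRTUS BOLOGNA|VBO|#1C1C1C|#C8A000",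
  "ZALGIRIS KAUNAS|ZAL|#007A33|#FFFFFF",
  "BC ZALGIRIS|ZAL|#007A33|#FFFFFF",
  "HAPOEL TEL AVIV|HAP|#CC0000|#000000",
  "DUBAI BASKETBALL|DUB|#003DA5|#FFD700",
  "VALENCIA BASKET|VAL|#F47920|#000000"]

-- Source B's 'for row in _ROWS: an, ab, co, co2 = row.split("|"); if an in tn or tn in an: return …'
def pvFindRow (tn : String) : List String → Option (String × String × String)
  | [] => none
  | row :: rest =>
    match PySem.Str.split? row "|" with
    | some [an, ab, co, co2] =>
      if (PySem.Str.isIn an tn || PySem.Str.isIn tn an) = true then some (ab, co, co2)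
      else pvFindRow tn rest
    | _ => pvFindRow tn rest  -- unreachable: every literal row has exactly four '|'-fields

-- Source B's _resolve
def pvResolve (t : String) : String × String × String :=
  match pvFindRow (pvNorm t) pvRows with
  | some v => v
  | none => (pvAuto t, "#777777", "#AAAAAA")

def build_team_maps_py_alt (teams : List String) : (List (String × String)) × (List (String × String)) × (List (String × String)) :=
  let rows := (PySem.List.dedup teams).map (fun t => (t, pvResolve t))
  ((PySem.Dict.ofList (rows.map (fun r => (r.1, r.2.1)))).items,
   (PySem.Dict.ofList (rows.map (fun r => (r.1, r.2.2.1)))).items,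
   (PySem.Dict.ofList (rows.map (fun r => (r.1, r.2.2.2)))).items)

-- ===== PRECONDITION & SPEC =====
def Spec_build_team_maps_py (teams : List String) (out : (List (String × String)) × (List (String × String)) × (List (String × String))) : Prop := out = build_team_maps_py_alt teams
instance (teams : List String) (out : (List (String × String)) × (List (String × String)) × (List (String × String))) : Decidable (Spec_build_team_maps_py teams out) := by unfold Spec_build_team_maps_py; infer_instance

-- ===== CLAIM =====
def Claim_equal_build_team_maps_py : Prop := ∀ (teams : List String), Dom_build_team_maps_py teams → Spec_build_team_maps_py teams (build_team_maps_py teams)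

-- ===== LEMMAS AND PROOFS =====

-- B's single scan of the packed rows equals the bind of A's three scans, whenever
-- the rows parse to the zipped entries of three identically-keyed tables.
theorem pvFindRow_align (tn : String) : ∀ (l1 : List (String × String)) (rows : List String) (l2 l3 : List (String × String)),
    rows.map (fun r => PySem.Str.split? r "|") =
      (l1.zip (l2.zip l3)).map (fun p => some [pvNorm p.1.1, p.1.2, p.2.1.2, p.2.2.2]) →
    l1.map Prod.fst = l2.map Prod.fst → l1.map Prod.fst = l3.map Prod.fst →
    pvFindRow tn rows =
      (pvScan tn l1).bind (fun a => (pvScan tn l2).bind (fun b => (pvScan tn l3).map (fun c => (a, b, c)))) := by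
  intro l1
  induction l1 with
  | nil =>
    intro rows l2 l3 hp h2 h3
    simp only [List.zip_nil_left, List.map_nil, List.map_eq_nil_iff] at hp
    subst hp
    simp [pvFindRow, pvScan]
  | cons q1 t1 ih =>
    intro rows l2 l3 hp h2 h3
    cases l2 with
    | nil => simp at h2
    | cons q2 t2 =>
      cases l3 with
      | nil => simp at h3
      | cons q3 t3 =>
        simp only [List.map_cons, List.cons.injEq] at h2 h3
        obtain ⟨hk2, ht2⟩ := h2
        obtain ⟨hk3, ht3⟩ := h3
        obtain ⟨a1, v1⟩ := q1
        obtain ⟨a2, v2⟩ := q2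
        obtain ⟨a3, v3⟩ := q3
        simp only at hk2 hk3
        subst hk2; subst hk3
        cases rows with
        | nil => simp at hp
        | cons row rest =>
          simp only [List.zip_cons_cons, List.map_cons, List.cons.injEq] at hp
          obtain ⟨hrow, hrest⟩ := hp
          cases hc : (PySem.Str.isIn (pvNorm a1) tn || PySem.Str.isIn tn (pvNorm a1)) with
          | true =>
            simp only [pvFindRow, hrow, pvScan, hc]
            simp
          | false =>
            simp only [pvFindRow, hrow, pvScan, hc]
            simp only [Bool.false_eq_true, if_false]
            exact ih rest t2 t3 hrest ht2 ht3

-- the literal packed rows parse to the zip of the three literal tables (aliases normalized)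
theorem pv_rows_parse : pvRows.map (fun r => PySem.Str.split? r "|") =
    ((pvBaseAbbrev.zip (pvBaseColors.zip pvBaseColors2)).map (fun p => some [pvNorm p.1.1, p.1.2, p.2.1.2, p.2.2.2])) := by decide

-- a successful scan returns one of the stored values
theorem pvScan_mem (tn : String) : ∀ (l : List (String × String)) (v : String),
    pvScan tn l = some v → v ∈ l.map Prod.snd := by
  intro l
  induction l with
  | nil => intro v h; simp [pvScan] at h
  | cons q t ih =>
    intro v h
    obtain ⟨a, w⟩ := q
    cases hc : (PySem.Str.isIn (pvNorm a) tn || PySem.Str.isIn tn (pvNorm a)) with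
    | true =>
      simp only [pvScan, hc] at h
      simp only [if_true, Option.some.injEq] at h
      simp [h]
    | false =>
      simp only [pvScan, hc] at h
      simp only [Bool.false_eq_true, if_false] at h
      simp [ih v h]

-- the three literal tables are keyed identically, and no stored value is empty
theorem pv_keys2 : pvBaseAbbrev.map Prod.fst = pvBaseColors.map Prod.fst := by decide
theorem pv_keys3 : pvBaseAbbrev.map Prod.fst = pvBaseColors2.map Prod.fst := by decide
theorem pv_vals_ne : (∀ v ∈ pvBaseAbbrev.map Prod.snd, v ≠ "") ∧
    (∀ v ∈ pvBaseColors.map Prod.snd, v ≠ "") ∧ (∀ v ∈ pvBaseColors2.map Prod.snd, v ≠ "") := by decide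

-- identically keyed scans fail together (the match condition depends only on the key)
theorem pvScan_none_iff (tn : String) : ∀ (l1 l2 : List (String × String)),
    l1.map Prod.fst = l2.map Prod.fst → (pvScan tn l1 = none ↔ pvScan tn l2 = none) := by
  intro l1
  induction l1 with
  | nil =>
    intro l2 h
    cases l2 with
    | nil => simp
    | cons q2 t2 => simp at h
  | cons q1 t1 ih =>
    intro l2 h
    cases l2 with
    | nil => simp at h
    | cons q2 t2 =>
      simp only [List.map_cons, List.cons.injEq] at h
      obtain ⟨hk, ht⟩ := h
      obtain ⟨a1, v1⟩ := q1
      obtain ⟨a2, v2⟩ := q2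
      simp only at hk
      subst hk
      cases hc : (PySem.Str.isIn (pvNorm a1) tn || PySem.Str.isIn tn (pvNorm a1)) with
      | true =>
        simp only [pvScan, hc]
        simp
      | false =>
        simp only [pvScan, hc]
        simp only [Bool.false_eq_true, if_false]
        exact ih t2 ht

-- B's per-team resolution equals the triple of A's per-team values
theorem pvResolve_eq (t : String) :
    pvResolve t = (pvOr (pvScan (pvNorm t) pvBaseAbbrev) (pvAuto t),
                   pvOr (pvScan (pvNorm t) pvBaseColors) "#777777",
                   pvOr (pvScan (pvNorm t) pvBaseColors2) "#AAAAAA") := by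
  have halign := pvFindRow_align (pvNorm t) pvBaseAbbrev pvRows pvBaseColors pvBaseColors2 pv_rows_parse pv_keys2 pv_keys3
  unfold pvResolve
  rw [halign]
  cases h1 : pvScan (pvNorm t) pvBaseAbbrev with
  | none =>
    have h2 : pvScan (pvNorm t) pvBaseColors = none := (pvScan_none_iff _ _ _ pv_keys2).mp h1
    have h3 : pvScan (pvNorm t) pvBaseColors2 = none := (pvScan_none_iff _ _ _ pv_keys3).mp h1
    simp [h2, h3, pvOr]
  | some a =>
    cases h2 : pvScan (pvNorm t) pvBaseColors with
    | none => exact absurd ((pvScan_none_iff _ _ _ pv_keys2).mpr h2) (by simp [h1])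
    | some b =>
      cases h3 : pvScan (pvNorm t) pvBaseColors2 with
      | none => exact absurd ((pvScan_none_iff _ _ _ pv_keys3).mpr h3) (by simp [h1])
      | some c =>
        have ha := pv_vals_ne.1 a (pvScan_mem _ _ _ h1)
        have hb := pv_vals_ne.2.1 b (pvScan_mem _ _ _ h2)
        have hc := pv_vals_ne.2.2 c (pvScan_mem _ _ _ h3)
        simp [pvOr, ha, hb, hc]

-- A's fold over the triple of dicts splits into three independent folds
theorem pv_triple_split (g1 g2 g3 : String → String) :
    ∀ (l : List String) (d1 d2 d3 : PySem.Dict String String),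
    l.foldl (fun st t => (st.1.insert t (g1 t), st.2.1.insert t (g2 t), st.2.2.insert t (g3 t))) (d1, d2, d3)
      = (l.foldl (fun d t => d.insert t (g1 t)) d1,
         l.foldl (fun d t => d.insert t (g2 t)) d2,
         l.foldl (fun d t => d.insert t (g3 t)) d3) := by
  intro l
  induction l with
  | nil => intro d1 d2 d3; rfl
  | cons t l ih => intro d1 d2 d3; simp only [List.foldl_cons]; exact ih _ _ _

-- a fold of inserts whose value is a pure function of the key: the items list is the
-- keep-first dedup of the keys, each paired with its value
theorem pv_items_insert_pure (g : String → String) :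
    ∀ (l : List String) (d : PySem.Dict String String) (u : List String),
    d.items = u.map (fun t => (t, g t)) → u.Nodup →
    (l.foldl (fun d t => d.insert t (g t)) d).items = (PySem.Set.update u l).map (fun t => (t, g t)) := by
  intro l
  induction l with
  | nil => intro d u hd hu; simpa [PySem.Set.update] using hd
  | cons t l ih =>
    intro d u hd hu
    have hkeys : d.keys = u := by
      simp [PySem.Dict.keys, hd, Function.comp_def]
    by_cases hmem : t ∈ u
    · have hcont : d.contains t = true := by
        rw [PySem.Dict.contains_eq_decide_mem_keys, hkeys]; simp [hmem]
      have hitems : (d.insert t (g t)).items = u.map (fun s => (s, g s)) := by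
        rw [PySem.Dict.items_insert_of_contains d (g t) hcont, hd, List.map_map]
        refine List.map_congr_left ?_
        intro s _
        by_cases hst : s = t
        · subst hst; simp
        · simp [hst]
      have hadd : PySem.Set.add u t = u := by
        simp [PySem.Set.add, PySem.Set.contains, hmem]
      simp only [List.foldl_cons, PySem.Set.update, List.foldl_cons] at *
      rw [show PySem.Set.add u t = u from hadd] at *
      exact ih _ u hitems hu
    · have hcont : d.contains t = false := by
        rw [PySem.Dict.contains_eq_decide_mem_keys, hkeys]; simp [hmem]
      have hitems : (d.insert t (g t)).items = (u ++ [t]).map (fun s => (s, g s)) := by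
        rw [PySem.Dict.items_insert_of_not_contains d (g t) hcont, hd]; simp
      have hnd : (u ++ [t]).Nodup := by
        simp only [List.nodup_append, List.nodup_singleton, true_and]
        refine ⟨hu, ?_⟩
        intro a ha b hb heq
        rw [List.mem_singleton] at hb
        subst hb
        subst heq
        exact hmem ha
      have hadd : PySem.Set.add u t = u ++ [t] := by
        simp [PySem.Set.add, PySem.Set.contains, hmem]
      simp only [List.foldl_cons, PySem.Set.update, List.foldl_cons] at *
      rw [show PySem.Set.add u t = u ++ [t] from hadd] at *
      exact ih _ _ hitems hnd

-- dict(pairs) over distinct keys: its items are exactly the pairs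
theorem pv_ofList_items (f : String → String) (ks : List String) (h : ks.Nodup) :
    (PySem.Dict.ofList (ks.map (fun t => (t, f t)))).items = ks.map (fun t => (t, f t)) := by
  have := PySem.Dict.items_foldl_insert_fresh (ks.map (fun t => (t, f t)))
      Prod.fst Prod.snd PySem.Dict.empty
      (by intro a _; simp) (by simpa [List.map_map, Function.comp_def] using h)
  simpa [PySem.Dict.ofList, PySem.Dict.update, List.map_map, Function.comp] using this

-- ===== VERDICT (by name: the statement is the Claim_ definition above) =====
theorem build_team_maps_py_spec : Claim_equal_build_team_maps_py := by
  intro teams _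
  unfold Spec_build_team_maps_py build_team_maps_py build_team_maps_py_alt
  simp only
  set g1 : String → String := fun t => pvOr (pvScan (pvNorm t) pvBaseAbbrev) (pvAuto t) with hg1
  set g2 : String → String := fun t => pvOr (pvScan (pvNorm t) pvBaseColors) "#777777" with hg2
  set g3 : String → String := fun t => pvOr (pvScan (pvNorm t) pvBaseColors2) "#AAAAAA" with hg3
  have hstep : (fun (st : PySem.Dict String String × PySem.Dict String String × PySem.Dict String String) t =>
      let tn := pvNorm t
      let ab := pvScan tn pvBaseAbbrev
      let co := pvScan tn pvBaseColors
      let co2 := pvScan tn pvBaseColors2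
      (st.1.insert t (pvOr ab (pvAuto t)),
       st.2.1.insert t (pvOr co "#777777"),
       st.2.2.insert t (pvOr co2 "#AAAAAA"))) =
      (fun (st : PySem.Dict String String × PySem.Dict String String × PySem.Dict String String) t =>
       (st.1.insert t (g1 t), st.2.1.insert t (g2 t), st.2.2.insert t (g3 t))) := rfl
  rw [hstep, pv_triple_split g1 g2 g3 teams]
  have h1 := pv_items_insert_pure g1 teams PySem.Dict.empty [] rfl List.nodup_nil
  have h2 := pv_items_insert_pure g2 teams PySem.Dict.empty [] rfl List.nodup_nil
  have h3 := pv_items_insert_pure g3 teams PySem.Dict.empty [] rfl List.nodup_nil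
  have hupd : PySem.Set.update ([] : List String) teams = PySem.List.dedup teams := rfl
  rw [hupd] at h1 h2 h3
  have hnd : (PySem.List.dedup teams).Nodup := PySem.List.nodup_dedup teams
  have e1 := pv_ofList_items (fun t => (pvResolve t).1) (PySem.List.dedup teams) hnd
  have e2 := pv_ofList_items (fun t => (pvResolve t).2.1) (PySem.List.dedup teams) hnd
  have e3 := pv_ofList_items (fun t => (pvResolve t).2.2) (PySem.List.dedup teams) hnd
  simp only [List.map_map, Function.comp_def] at *
  rw [h1, h2, h3, e1, e2, e3]
  refine congrArg₂ Prod.mk ?_ (congrArg₂ Prod.mk ?_ ?_) <;>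
    exact List.map_congr_left (fun t _ => by rw [pvResolve_eq t])
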